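-- pv_equiv track=rewrite | github.com/Zeydel/Advent-Of-Code | AoC24/Day12/Day12.py | is_same_group
-- ===== SOURCE A (Python) =====
-- def is_same_group(fence_group_1, fence_group_2):
--
--     # The directions we can go in
--     dirs = [(1, 0),
--             (-1, 0),
--             (0, 1),
--             (0, -1)]
--
--     # For every pair of groups of fences
--     for p1x, p1y in fence_group_1:
--         for p2x, p2y in fence_group_2:
--
--             # For every direction
--             for dx, dy in dirs:
--
--                 # If the fences are adjoining, return true
--                 if p1x + dx == p2x and p1y + dy == p2y:
--                     return True
--
--     # Otherwise return false
--     return False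
-- ===== SOURCE B (Python) =====
-- def is_same_group(fence_group_1, fence_group_2):
--     # Dilate group 1 into a frontier set of all its neighbor cells, then one set-disjointness test.
--     frontier = set()
--     for x, y in fence_group_1:
--         frontier.update(((x + 1, y), (x - 1, y), (x, y + 1), (x, y - 1)))
--     return not frontier.isdisjoint(fence_group_2)
-- ===== Notes on version B (the rewrite author's own statement) =====
-- stated objective: faster
-- what changed: Replaces the nested group1 x group2 x directions scan with a precomputed dilation set of group1's neighbors followed by a single set-disjointness test against group2.
import Mathlib
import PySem

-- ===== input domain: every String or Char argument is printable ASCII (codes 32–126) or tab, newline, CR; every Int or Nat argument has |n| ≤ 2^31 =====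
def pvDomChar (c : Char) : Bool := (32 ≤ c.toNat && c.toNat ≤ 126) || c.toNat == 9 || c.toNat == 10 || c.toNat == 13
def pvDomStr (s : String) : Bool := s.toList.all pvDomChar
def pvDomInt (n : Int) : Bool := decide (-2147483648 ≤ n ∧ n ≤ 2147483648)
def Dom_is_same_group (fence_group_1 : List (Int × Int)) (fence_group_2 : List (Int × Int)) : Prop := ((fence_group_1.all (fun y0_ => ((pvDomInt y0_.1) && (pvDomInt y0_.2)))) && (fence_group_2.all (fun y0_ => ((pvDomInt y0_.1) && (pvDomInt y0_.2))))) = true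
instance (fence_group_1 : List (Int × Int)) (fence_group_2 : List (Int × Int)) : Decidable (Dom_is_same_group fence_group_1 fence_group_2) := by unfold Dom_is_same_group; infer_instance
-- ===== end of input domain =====

-- B replaces the nested group1×group2×directions scan by a dilation set of group1's neighbors and one set-disjointness test (alternative decomposition, same exact result).


-- ===== PORT A =====
def is_same_group (fence_group_1 : List (Int × Int)) (fence_group_2 : List (Int × Int)) : Bool :=
  let dirs : List (Int × Int) := [(1, 0), (-1, 0), (0, 1), (0, -1)]
  fence_group_1.any (fun p1 =>
    fence_group_2.any (fun p2 =>
      dirs.any (fun d => p1.1 + d.1 == p2.1 && p1.2 + d.2 == p2.2)))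

-- ===== PORT B =====
-- the four neighbor coordinates added to the frontier for one cell of group 1
def pvNbrs (p : Int × Int) : List (Int × Int) :=
  [(p.1 + 1, p.2), (p.1 - 1, p.2), (p.1, p.2 + 1), (p.1, p.2 - 1)]

def is_same_group_alt (fence_group_1 : List (Int × Int)) (fence_group_2 : List (Int × Int)) : Bool :=
  let frontier : PySem.Set (Int × Int) :=
    fence_group_1.foldl (fun s p => PySem.Set.update s (pvNbrs p)) PySem.Set.empty
  !(PySem.Set.isdisjoint frontier fence_group_2)

-- ===== PRECONDITION & SPEC =====
def Spec_is_same_group (fence_group_1 : List (Int × Int)) (fence_group_2 : List (Int × Int)) (out : Bool) : Prop := out = is_same_group_alt fence_group_1 fence_group_2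
instance (fence_group_1 : List (Int × Int)) (fence_group_2 : List (Int × Int)) (out : Bool) : Decidable (Spec_is_same_group fence_group_1 fence_group_2 out) := by unfold Spec_is_same_group; infer_instance

-- ===== CLAIM (what is proved, stated in full; the proofs are below) =====
def Claim_equal_is_same_group : Prop := ∀ (fence_group_1 : List (Int × Int)) (fence_group_2 : List (Int × Int)), Dom_is_same_group fence_group_1 fence_group_2 → Spec_is_same_group fence_group_1 fence_group_2 (is_same_group fence_group_1 fence_group_2)

-- ===== LEMMAS AND PROOFS =====

-- membership in the frontier built by B's fold
theorem mem_frontier_fold (g1 : List (Int × Int)) (s : PySem.Set (Int × Int)) (c : Int × Int) :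
    (c ∈ g1.foldl (fun s p => PySem.Set.update s (pvNbrs p)) s) ↔
      (c ∈ s ∨ ∃ p ∈ g1, c ∈ pvNbrs p) := by
  induction g1 generalizing s with
  | nil => simp
  | cons q qs ih =>
    simp only [List.foldl_cons, ih, PySem.Set.mem_update, List.mem_cons]
    aesop

-- ===== VERDICT (by name: the statement is the Claim_ definition above) =====
theorem is_same_group_spec : Claim_equal_is_same_group := by
  intro g1 g2 _
  unfold Spec_is_same_group is_same_group is_same_group_alt
  rw [Bool.eq_iff_iff]
  simp only [List.any_eq_true, Bool.and_eq_true, beq_iff_eq, Bool.not_eq_true',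
    Bool.eq_false_iff, ne_eq, PySem.Set.isdisjoint_iff]
  push Not
  simp only [mem_frontier_fold, PySem.Set.empty, List.not_mem_nil, false_or]
  constructor
  · rintro ⟨p1, h1, p2, h2, d, hd, hx, hy⟩
    refine ⟨p2, ⟨⟨p1, h1, ?_⟩, h2⟩⟩
    fin_cases hd <;> simp_all [pvNbrs, Prod.ext_iff] <;> omega
  · rintro ⟨c, ⟨⟨p1, h1, hn⟩, h2⟩⟩
    · refine ⟨p1, h1, c, h2, ?_⟩
      simp only [pvNbrs, List.mem_cons] at hn
      rcases hn with h|h|h|h|h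
      · exact ⟨(1,0), by simp, by simp [h]; try omega⟩
      · exact ⟨(-1,0), by simp, by simp [h]; try omega⟩
      · exact ⟨(0,1), by simp, by simp [h]; try omega⟩
      · exact ⟨(0,-1), by simp, by simp [h]; try omega⟩
      · simp at h
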